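-- pv_equiv track=rewrite | github.com/wyk18703232953/myResearch | codeComplex/data/filteredData/python/constant/python_constant_0105.py | substraction
-- ===== SOURCE A (Python) =====
-- def substraction(a, b):
--     if a == 0 or b == 0:
--         return 0
--     else:
--         if a > b:
--             count = a // b
--             return substraction(a % b, b) + count
--         else:
--             count = b // a
--             return substraction(a, b % a) + count
-- ===== SOURCE B (Python) =====
-- def substraction(a, b):
--     # Normalize once to (larger, smaller); then a single symmetric Euclid loop
--     # with a tuple swap removes the per-step branch of A's recursion.
--     x, y = (a, b) if a >= b else (b, a)
--     total = 0
--     while x != 0 and y != 0: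
--         total += x // y
--         x, y = y, x % y
--     return total
-- ===== Notes on version B (the rewrite author's own statement) =====
-- stated objective: simpler
-- what changed: B normalizes the pair once to (larger, smaller) and runs a single symmetric Euclid loop with a tuple swap and a running-total accumulator, removing both the recursion and the per-step larger/smaller branch of A.
import Mathlib
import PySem

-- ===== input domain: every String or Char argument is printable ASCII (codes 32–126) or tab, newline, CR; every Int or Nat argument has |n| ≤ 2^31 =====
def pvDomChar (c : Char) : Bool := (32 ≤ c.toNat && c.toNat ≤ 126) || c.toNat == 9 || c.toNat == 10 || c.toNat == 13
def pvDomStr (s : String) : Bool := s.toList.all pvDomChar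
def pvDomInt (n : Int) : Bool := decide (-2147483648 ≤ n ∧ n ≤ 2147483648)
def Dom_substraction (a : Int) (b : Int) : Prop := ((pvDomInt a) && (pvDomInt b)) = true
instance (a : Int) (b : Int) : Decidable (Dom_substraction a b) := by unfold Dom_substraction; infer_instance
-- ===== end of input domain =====

-- B normalizes the pair once to (larger, smaller) and runs a single symmetric Euclid loop
-- with a tuple swap, removing A's per-step branch (objective: simpler).

-- ===== PORT A =====
-- literal port of A's branching recursion; fuel only makes the possibly-diverging Python recursion total
def substractionFuel : Nat → Int → Int → Int
  | 0, _, _ => 0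
  | n+1, a, b =>
    if a = 0 ∨ b = 0 then 0
    else if a > b then substractionFuel n (PySem.Int.mod a b) b + PySem.Int.floordiv a b
    else substractionFuel n a (PySem.Int.mod b a) + PySem.Int.floordiv b a

def substraction (a : Int) (b : Int) : Int := substractionFuel (a.natAbs + b.natAbs + 1) a b

-- ===== PORT B =====
-- literal port of B's while loop: state (x, y, total), tuple swap (y, x % y) each round
def substractionAltLoop : Nat → Int → Int → Int → Int
  | 0, _, _, total => total
  | n+1, x, y, total =>
    if x ≠ 0 ∧ y ≠ 0 then
      substractionAltLoop n y (PySem.Int.mod x y) (total + PySem.Int.floordiv x y)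
    else total

def substraction_alt (a : Int) (b : Int) : Int :=
  let xy := if a ≥ b then (a, b) else (b, a)
  substractionAltLoop (a.natAbs + b.natAbs + 1) xy.1 xy.2 0

-- ===== PRECONDITION & SPEC =====
-- Pre_ excludes exactly the inputs on which Python A raises RecursionError (the recursion never
-- reaches a base case): both arguments negative and unequal, or mixed signs without divisibility.
def Pre_substraction (a : Int) (b : Int) : Prop :=
  a = 0 ∨ b = 0 ∨ (0 < a ∧ 0 < b) ∨ a = b ∨ (a < 0 ∧ 0 < b ∧ a ∣ b) ∨ (b < 0 ∧ 0 < a ∧ b ∣ a)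
instance (a : Int) (b : Int) : Decidable (Pre_substraction a b) := by unfold Pre_substraction; infer_instance
def pvWitness_substraction : Int × Int := (12, 18)

def Spec_substraction (a : Int) (b : Int) (out : Int) : Prop := out = substraction_alt a b
instance (a : Int) (b : Int) (out : Int) : Decidable (Spec_substraction a b out) := by unfold Spec_substraction; infer_instance

-- ===== CLAIM (what is proved, stated in full; the proofs are below) =====
def Claim_equal_substraction : Prop := ∀ (a : Int) (b : Int), Dom_substraction a b → Pre_substraction a b → Spec_substraction a b (substraction a b)

-- ===== LEMMAS AND PROOFS =====
theorem substractionFuel_zero_left (n : Nat) (b : Int) : substractionFuel n 0 b = 0 := by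
  cases n <;> simp [substractionFuel]

theorem substractionFuel_zero_right (n : Nat) (a : Int) : substractionFuel n a 0 = 0 := by
  cases n <;> simp [substractionFuel]

theorem substractionAltLoop_zero_right (n : Nat) (x t : Int) :
    substractionAltLoop n x 0 t = t := by
  cases n <;> simp [substractionAltLoop]

-- A's recursion is symmetric in its two arguments (with the same fuel).
theorem substractionFuel_comm (n : Nat) : ∀ (a b : Int),
    substractionFuel n a b = substractionFuel n b a := by
  induction n with
  | zero => intro a b; rfl
  | succ n ih =>
    intro a b
    simp only [substractionFuel]
    by_cases h : a = 0 ∨ b = 0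
    · rw [if_pos h, if_pos (Or.symm h)]
    · rw [if_neg h, if_neg (fun hc => h (Or.symm hc))]
      rcases lt_trichotomy a b with hab | hab | hab
      · rw [if_neg (by omega), if_pos (by omega), ih]
      · subst hab
        rw [if_neg (by omega)]
      · rw [if_pos (by omega), if_neg (by omega), ih]

-- main invariant: on a normalized state (y ≤ x, and y nonnegative or dividing x),
-- B's loop computes A's recursion plus the accumulator — with the same fuel.
theorem substractionAltLoop_eq (n : Nat) : ∀ (x y t : Int), y ≤ x → (0 ≤ y ∨ y ∣ x) →
    substractionAltLoop n x y t = substractionFuel n x y + t := by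
  induction n with
  | zero => intro x y t _ _; simp [substractionAltLoop, substractionFuel]
  | succ n ih =>
    intro x y t hyx hy
    simp only [substractionAltLoop, substractionFuel]
    by_cases h : x ≠ 0 ∧ y ≠ 0
    · rw [if_pos h, if_neg (by tauto)]
      rcases eq_or_lt_of_le hyx with heq | hlt
      · -- x = y: one quotient of 1, then the remainder is 0 and both stop
        subst heq
        rw [if_neg (by omega)]
        have hm : PySem.Int.mod y y = 0 := by
          rw [PySem.Int.mod_eq_zero_iff_dvd]
        rw [hm, substractionAltLoop_zero_right, substractionFuel_zero_right]
        ring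
      · rw [if_pos hlt]
        rcases hy with hy0 | hdvd
        · -- y > 0 (y = 0 contradicts the guard): genuine Euclid step
          have hypos : 0 < y := lt_of_le_of_ne hy0 (fun hc => h.2 hc.symm)
          have hmlt : PySem.Int.mod x y < y := PySem.Int.mod_lt x hypos
          have hmnn : 0 ≤ PySem.Int.mod x y := PySem.Int.mod_nonneg x hypos
          rw [substractionFuel_comm n, ih y (PySem.Int.mod x y) _ (le_of_lt hmlt) (Or.inl hmnn)]
          ring
        · -- y < 0 dividing x: remainder is 0, both sides stop after this step
          have hm : PySem.Int.mod x y = 0 := by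
            rw [PySem.Int.mod_eq_zero_iff_dvd]; exact hdvd
          rw [hm, substractionAltLoop_zero_right, substractionFuel_zero_left]
          ring
    · rw [if_neg h, if_pos (by tauto)]
      ring

-- ===== VERDICT (by name: the statement is the Claim_ definition above) =====
theorem substraction_spec : Claim_equal_substraction := by
  intro a b _ hpre
  unfold Spec_substraction substraction substraction_alt
  by_cases hab : a ≥ b
  · rw [if_pos hab]
    have hside : 0 ≤ b ∨ b ∣ a := by
      unfold Pre_substraction at hpre
      rcases hpre with h | h | h | h | h | h
      · subst h; rcases eq_or_lt_of_le (le_of_lt (by omega : b - 1 < b)) with _ | _ <;>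
          exact if hb : 0 ≤ b then Or.inl hb else Or.inr ⟨0, by omega⟩
      · exact Or.inl (le_of_eq h.symm)
      · exact Or.inl (le_of_lt h.2)
      · exact Or.inr ⟨1, by omega⟩
      · omega
      · exact Or.inr h.2.2
    rw [substractionAltLoop_eq _ a b 0 hab hside]; ring
  · rw [if_neg hab]
    have hside : 0 ≤ a ∨ a ∣ b := by
      unfold Pre_substraction at hpre
      rcases hpre with h | h | h | h | h | h
      · exact Or.inl (le_of_eq h.symm)
      · subst h; exact if ha : 0 ≤ a then Or.inl ha else Or.inr ⟨0, by omega⟩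
      · exact Or.inl (le_of_lt h.1)
      · omega
      · exact Or.inr h.2.2
      · exact Or.inl (le_of_lt h.2.1)
    rw [substractionFuel_comm _ a b, substractionAltLoop_eq _ b a 0 (by omega) hside]; ring
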